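-- pv_equiv track=rewrite | github.com/ivansche/adaptive_estimators | idnns/information/information_process.py | find_min_value
-- ===== SOURCE A (Python) =====
-- def find_min_value(ws):
--     min=[]
--     for i in range(len(ws)):
--         min.append(1)
--         for j in range(len(ws[i])):
--             for k in range(len(ws[i][j])):
--                 for l in range(len(ws[i][j][k])):
--                     if ws[i][j][k][l]<min[i]:
--                         min[i]=ws[i][j][k][l]
--     for i in range(len(min)):
--         for j in range(len(min)):
--             if (min[j]>min[i] and j>i):
--                 min[j]=min[i]
--     return min
-- ===== SOURCE B (Python) =====
-- def find_min_value(ws):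
--     out = []
--     run = None
--     for block in ws:
--         m = min([1] + [v for plane in block for row in plane for v in row])
--         run = m if run is None else min(run, m)
--         out.append(run)
--     return out
-- ===== Notes on version B (the rewrite author's own statement) =====
-- stated objective: faster
-- what changed: Replaced A's two-phase scheme (per-block nested min loops, then a quadratic index-pair pass to propagate prefix minima) with a single pass that keeps a running minimum while emitting each block's capped minimum, removing the O(m^2) pair loop.
import Mathlib
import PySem

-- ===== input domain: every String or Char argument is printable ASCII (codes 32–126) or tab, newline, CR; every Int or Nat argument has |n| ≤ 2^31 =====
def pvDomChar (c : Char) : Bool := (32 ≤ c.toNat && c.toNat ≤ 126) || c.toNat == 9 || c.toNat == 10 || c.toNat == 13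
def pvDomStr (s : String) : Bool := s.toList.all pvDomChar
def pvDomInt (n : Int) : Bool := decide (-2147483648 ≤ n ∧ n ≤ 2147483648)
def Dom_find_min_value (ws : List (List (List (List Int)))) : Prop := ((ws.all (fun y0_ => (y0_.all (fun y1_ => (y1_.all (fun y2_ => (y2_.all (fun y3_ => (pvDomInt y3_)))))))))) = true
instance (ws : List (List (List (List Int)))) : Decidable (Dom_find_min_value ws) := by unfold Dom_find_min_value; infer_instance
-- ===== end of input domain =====

-- B replaces A's quadratic index-pair prefix-propagation pass with a single running-minimum pass (return value only; neither mutates its argument).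

-- ===== PORT A =====
-- one step of A's second (quadratic) phase: the body of the j-loop
def fmvStep (acc : List Int) (i j : Nat) : List Int :=
  if acc.getD j 0 > acc.getD i 0 ∧ i < j then acc.set j (acc.getD i 0) else acc

def find_min_value (ws : List (List (List (List Int)))) : List Int :=
  -- phase 1: append 1, then lower it by every element of the block (nested loops)
  let mins := ws.foldl (fun acc b =>
    acc ++ [b.foldl (fun m p => p.foldl (fun m r =>
      r.foldl (fun m v => if v < m then v else m) m) m) 1]) ([] : List Int)
  -- phase 2: the quadratic pair loop 'if min[j] > min[i] and j > i: min[j] = min[i]'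
  (List.range mins.length).foldl (fun acc i =>
    (List.range mins.length).foldl (fun acc j => fmvStep acc i j) acc) mins

-- ===== PORT B =====
def find_min_value_alt (ws : List (List (List (List Int)))) : List Int :=
  (ws.foldl (fun (st : Option Int × List Int) b =>
      let m := (b.flatMap (fun p => p.flatMap (fun r => r))).foldl min (1 : Int)
      let run := match st.1 with | none => m | some r => min r m
      (some run, st.2 ++ [run])) (none, ([] : List Int))).2

-- ===== PRECONDITION & SPEC =====
def Spec_find_min_value (ws : List (List (List (List Int)))) (out : List Int) : Prop := out = find_min_value_alt ws
instance (ws : List (List (List (List Int)))) (out : List Int) : Decidable (Spec_find_min_value ws out) := by unfold Spec_find_min_value; infer_instance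

-- ===== CLAIM (what is proved, stated in full; the proofs are below) =====
def Claim_equal_find_min_value : Prop := ∀ (ws : List (List (List (List Int)))), Dom_find_min_value ws → Spec_find_min_value ws (find_min_value ws)

-- ===== LEMMAS AND PROOFS =====

-- ===== VERDICT (by name: the statement is the Claim_ definition above) =====
-- block minimum as A computes it
def blockA (b : List (List (List Int))) : Int :=
  b.foldl (fun m p => p.foldl (fun m r =>
    r.foldl (fun m v => if v < m then v else m) m) m) 1

-- prefix minima with an optional running value (B's mathematical shape)
def pmin : Option Int → List Int → List Int
  | _, [] => []
  | none, m :: t => m :: pmin (some m) t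
  | some r, m :: t => min r m :: pmin (some (min r m)) t

-- A's phase 2 as a standalone function
def phase2 (xs : List Int) : List Int :=
  (List.range xs.length).foldl (fun acc i =>
    (List.range xs.length).foldl (fun acc j => fmvStep acc i j) acc) xs

theorem foldl_shift {L : List Nat} (f g : List Int → Nat → List Int) (x : Int)
    (h : ∀ acc j, j ∈ L → f (x :: acc) j = x :: g acc j) :
    ∀ acc, List.foldl f (x :: acc) L = x :: List.foldl g acc L := by
  induction L with
  | nil => intro acc; rfl
  | cons a L ih =>
    intro acc
    simp only [List.foldl_cons, h acc a (List.mem_cons_self)]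
    exact ih (fun acc j hj => h acc j (List.mem_cons_of_mem _ hj)) _

theorem if_lt_eq_min (v m : Int) : (if v < m then v else m) = min m v := by
  simp [min_def]; omega

theorem foldl_min_shape (L : List Int) : ∀ m : Int,
    L.foldl (fun m v => if v < m then v else m) m = L.foldl min m := by
  induction L with
  | nil => intro m; rfl
  | cons a L _ => intro m; simp only [List.foldl_cons, if_lt_eq_min]

-- A's per-plane fold equals a fold over the flattened plane
theorem plane_eq_flat (p : List (List Int)) : ∀ m : Int,
    p.foldl (fun m r => r.foldl (fun m v => if v < m then v else m) m) m
      = (p.flatMap (fun r => r)).foldl min m := by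
  induction p with
  | nil => intro m; rfl
  | cons r p ih =>
    intro m
    rw [List.flatMap_cons, List.foldl_append, List.foldl_cons, foldl_min_shape, ih]

-- A's nested per-block fold equals B's flatten-then-fold
theorem blockA_eq_flat (b : List (List (List Int))) :
    blockA b = (b.flatMap (fun p => p.flatMap (fun r => r))).foldl min (1 : Int) := by
  unfold blockA
  generalize (1 : Int) = m
  induction b generalizing m with
  | nil => rfl
  | cons p b ih =>
    rw [List.flatMap_cons, List.foldl_append, List.foldl_cons, plane_eq_flat, ih]

-- phase 1 builds the list of block minima
theorem phase1_eq_map (ws : List (List (List (List Int)))) : ∀ acc : List Int,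
    ws.foldl (fun acc b =>
      acc ++ [b.foldl (fun m p => p.foldl (fun m r =>
        r.foldl (fun m v => if v < m then v else m) m) m) 1]) acc
    = acc ++ ws.map blockA := by
  induction ws with
  | nil => intro acc; simp
  | cons b ws ih => intro acc; simp only [List.foldl_cons, List.map_cons, ih, blockA,
      List.append_assoc, List.cons_append, List.nil_append]

-- B's fold accumulates pmin
theorem alt_fold (ws : List (List (List (List Int)))) : ∀ (r : Option Int) (acc : List Int),
    (ws.foldl (fun (st : Option Int × List Int) b =>
      let m := (b.flatMap (fun p => p.flatMap (fun r => r))).foldl min (1 : Int)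
      let run := match st.1 with | none => m | some r => min r m
      (some run, st.2 ++ [run])) (r, acc)).2 = acc ++ pmin r (ws.map blockA) := by
  induction ws with
  | nil => intro r acc; simp [pmin]
  | cons b ws ih =>
    intro r acc
    simp only [List.foldl_cons, List.map_cons, blockA_eq_flat]
    cases r with
    | none => rw [ih]; simp [pmin]
    | some r => rw [ih]; simp [pmin]

theorem pmin_map_absorb : ∀ (t : List Int) (a x : Int), a ≤ x →
    pmin (some a) (t.map (fun v => min x v)) = pmin (some a) t := by
  intro t
  induction t with
  | nil => intro a x _; rfl
  | cons v t ih =>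
    intro a x h
    simp only [List.map_cons, pmin]
    have h1 : min a (min x v) = min a v := by simp [min_def]; omega
    rw [h1]
    exact congrArg _ (ih (min a v) x (le_trans (min_le_left a v) h))

theorem pmin_some_eq_map (t : List Int) (x : Int) :
    pmin (some x) t = pmin none (t.map (fun v => min x v)) := by
  cases t with
  | nil => rfl
  | cons m t =>
    simp only [pmin, List.map_cons]
    exact congrArg _ (pmin_map_absorb t (min x m) x (min_le_left x m)).symm

-- a j-step of the inner loop at i+1 on a cons: skip the head
theorem step_shift (acc : List Int) (x : Int) (i j : Nat) :
    fmvStep (x :: acc) (i + 1) (j + 1) = x :: fmvStep acc i j := by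
  simp only [fmvStep, List.getD_cons_succ]
  by_cases h : acc.getD j 0 > acc.getD i 0 ∧ i < j
  · rw [if_pos h, if_pos ⟨h.1, Nat.succ_lt_succ h.2⟩]; rfl
  · rw [if_neg h, if_neg (fun hc => h ⟨hc.1, Nat.lt_of_succ_lt_succ hc.2⟩)]

theorem step_shift0 (acc : List Int) (x : Int) (i : Nat) :
    fmvStep (x :: acc) (i + 1) 0 = x :: acc := by
  simp [fmvStep]

-- inner loop at i+1 over range (k+1) on x :: acc : the head is untouched
theorem inner_shift (k : Nat) (x : Int) (i : Nat) (acc : List Int) :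
    (List.range (k + 1)).foldl (fun acc j => fmvStep acc (i + 1) j) (x :: acc)
      = x :: (List.range k).foldl (fun acc j => fmvStep acc i j) acc := by
  rw [List.range_succ_eq_map, List.foldl_cons, step_shift0, List.foldl_map]
  exact foldl_shift _ _ x (fun acc j _ => step_shift acc x i j) acc

-- inner loop at i = 0 on x :: t : positions j+1 with value > x are set to x
theorem inner_zero (x : Int) : ∀ (k : Nat) (t : List Int),
    (List.range (k + 1)).foldl (fun acc j => fmvStep acc 0 j) (x :: t)
      = x :: (List.range k).foldl
          (fun acc j => if acc.getD j 0 > x then acc.set j x else acc) t := by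
  intro k t
  rw [List.range_succ_eq_map, List.foldl_cons]
  have h0 : fmvStep (x :: t) 0 0 = x :: t := by simp [fmvStep]
  rw [h0, List.foldl_map]
  refine foldl_shift _ _ x (fun acc j _ => ?_) t
  simp only [fmvStep, List.getD_cons_succ, List.getD_cons_zero]
  by_cases h : acc.getD j 0 > x
  · rw [if_pos ⟨h, Nat.succ_pos j⟩, if_pos h]; rfl
  · rw [if_neg (fun hc => h hc.1), if_neg h]

-- the i = 0 pass over the whole range caps every element by x
theorem pass_zero (x : Int) : ∀ t : List Int,
    (List.range t.length).foldl
      (fun acc j => if acc.getD j 0 > x then acc.set j x else acc) t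
    = t.map (fun v => min x v) := by
  intro t
  induction t with
  | nil => rfl
  | cons v t ih =>
    simp only [List.length_cons, List.map_cons]
    rw [List.range_succ_eq_map, List.foldl_cons]
    have h0 : (if (v :: t).getD 0 0 > x then (v :: t).set 0 x else (v :: t))
        = min x v :: t := by
      by_cases h : v > x
      · rw [if_pos (by simpa using h)]; simp [min_def]; omega
      · rw [if_neg (by simpa using h)]; simp [min_def]; omega
    rw [h0, List.foldl_map]
    rw [foldl_shift _ (fun acc j => if acc.getD j 0 > x then acc.set j x else acc)
      (min x v) (fun acc j _ => ?_) t]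
    · rw [ih]
    · simp only [List.getD_cons_succ]
      by_cases h : acc.getD j 0 > x
      · rw [if_pos h, if_pos h]; rfl
      · rw [if_neg h, if_neg h]

theorem phase2_cons (x : Int) (t : List Int) :
    phase2 (x :: t) = x :: phase2 (t.map (fun v => min x v)) := by
  unfold phase2
  simp only [List.length_cons, List.length_map]
  nth_rewrite 2 [List.range_succ_eq_map]
  rw [List.foldl_cons]
  rw [show (List.range (t.length + 1)).foldl (fun acc j => fmvStep acc 0 j) (x :: t)
      = x :: (t.map fun v => min x v) from by rw [inner_zero, pass_zero]]
  rw [List.foldl_map]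
  exact foldl_shift _ _ x
    (fun acc i _ => inner_shift t.length x i acc) (t.map fun v => min x v)

theorem phase2_eq_pmin : ∀ (n : Nat) (xs : List Int), xs.length = n →
    phase2 xs = pmin none xs := by
  intro n
  induction n with
  | zero => intro xs h; rw [List.length_eq_zero_iff] at h; subst h; rfl
  | succ n ih =>
    intro xs h
    cases xs with
    | nil => simp at h
    | cons x t =>
      rw [phase2_cons, pmin, pmin_some_eq_map]
      congr 1
      exact ih _ (by simpa using h)

theorem find_min_value_eq (ws : List (List (List (List Int)))) :
    find_min_value ws = find_min_value_alt ws := by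
  unfold find_min_value find_min_value_alt
  rw [phase1_eq_map, List.nil_append, alt_fold, List.nil_append]
  exact phase2_eq_pmin _ _ rfl

-- ===== VERDICT (by name: the statement is the Claim_ definition above) =====
theorem find_min_value_spec : Claim_equal_find_min_value := by
  intro ws _
  unfold Spec_find_min_value
  exact find_min_value_eq ws
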